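-- pv_equiv track=rewrite | github.com/Kruxhna/leetcode | 2089-maximum-matrix-sum/maximum-matrix-sum.py | maxMatrixSum
-- ===== SOURCE A (Python) =====
-- def maxMatrixSum(matrix: list[list[int]]) -> int:
--     total_sum = 0
--     neg_count = 0
--     min_abs = float('inf')
--
--     for row in matrix:
--         for val in row:
--             abs_val = abs(val)
--             total_sum += abs_val
--             if abs_val < min_abs:
--                 min_abs = abs_val
--             if val < 0:
--                 neg_count += 1
--
--     if neg_count % 2 == 0:
--         return total_sum
--     return total_sum - 2 * min_abs
-- ===== SOURCE B (Python) =====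
-- def maxMatrixSum(matrix: list[list[int]]) -> int:
--     # Parity DP: even = best sum negating an even number of elements seen so far,
--     # odd = best sum negating an odd number (None until one element is seen).
--     even, odd = 0, None
--     for row in matrix:
--         for v in row:
--             if odd is None:
--                 even, odd = even + v, even - v
--             else:
--                 even, odd = max(even + v, odd - v), max(odd + v, even - v)
--     return even
-- ===== Notes on version B (the rewrite author's own statement) =====
-- stated objective: alternative
-- what changed: Replaces A's analytic formula (sum of absolute values, negative count, running minimum, then subtract 2*min if the count is odd) by a parity dynamic program that carries two accumulators - the best sum achievable negating an even number of elements seen so far and the best negating an odd number - updated per element with max, returning the even-parity accumulator; correct because flipping adjacent pairs lets exactly the even-negation sign patterns be realised.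
import Mathlib
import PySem

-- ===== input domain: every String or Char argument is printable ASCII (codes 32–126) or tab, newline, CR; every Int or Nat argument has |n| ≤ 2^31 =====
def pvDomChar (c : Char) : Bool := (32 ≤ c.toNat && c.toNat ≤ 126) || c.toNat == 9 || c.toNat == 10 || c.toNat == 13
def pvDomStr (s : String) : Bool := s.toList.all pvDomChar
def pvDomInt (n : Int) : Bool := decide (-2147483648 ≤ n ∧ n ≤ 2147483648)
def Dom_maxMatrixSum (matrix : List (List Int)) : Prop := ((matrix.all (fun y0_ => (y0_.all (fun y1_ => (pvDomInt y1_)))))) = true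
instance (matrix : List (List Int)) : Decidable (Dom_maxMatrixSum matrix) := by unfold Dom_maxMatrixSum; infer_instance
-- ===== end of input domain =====

-- B replaces A's abs-sum/negative-count/min formula by a parity dynamic program
-- (best sum with an even vs odd number of negations so far); objective: alternative.


-- ===== PORT A =====
-- one step of A's inner loop over state (total_sum, neg_count, min_abs);
-- min_abs : Option Int models the float('inf') start (none = inf, never returned by A)
def stepA (s : Int × Int × Option Int) (v : Int) : Int × Int × Option Int :=
  let a := |v|
  ( s.1 + a
  , if v < 0 then s.2.1 + 1 else s.2.1
  , match s.2.2 with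
    | none => some a            -- abs_val < inf always holds
    | some m => if a < m then some a else some m )

def maxMatrixSum (matrix : List (List Int)) : Int :=
  let s := matrix.foldl (fun s row => row.foldl stepA s) ((0 : Int), (0 : Int), (none : Option Int))
  if s.2.1 % 2 == 0 then s.1
  else
    match s.2.2 with
    | some m => s.1 - 2 * m
    | none => s.1               -- unreachable: an odd neg_count requires at least one element

-- ===== PORT B =====
-- one step of B's inner loop over state (even, odd); odd : Option Int models Python's None
def stepB (s : Int × Option Int) (v : Int) : Int × Option Int :=
  match s.2 with
  | none => (s.1 + v, some (s.1 - v))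
  | some o => (max (s.1 + v) (o - v), some (max (o + v) (s.1 - v)))

def maxMatrixSum_alt (matrix : List (List Int)) : Int :=
  (matrix.foldl (fun s row => row.foldl stepB s) ((0 : Int), (none : Option Int))).1

-- ===== PRECONDITION & SPEC =====
def Spec_maxMatrixSum (matrix : List (List Int)) (out : Int) : Prop := out = maxMatrixSum_alt matrix
instance (matrix : List (List Int)) (out : Int) : Decidable (Spec_maxMatrixSum matrix out) := by unfold Spec_maxMatrixSum; infer_instance

-- ===== CLAIM =====
def Claim_equal_maxMatrixSum : Prop := ∀ (matrix : List (List Int)), Dom_maxMatrixSum matrix → Spec_maxMatrixSum matrix (maxMatrixSum matrix)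

-- ===== LEMMAS AND PROOFS =====

-- A's fold, characterised componentwise on a flat list, state fully general
lemma foldA_char (xs : List Int) (t n : Int) (m : Option Int) :
    xs.foldl stepA (t, n, m) =
      ( t + (xs.map (fun v => |v|)).sum
      , n + ((xs.filter (fun v => v < 0)).length : Int)
      , xs.foldl (fun o v => match o with
          | none => some |v|
          | some q => if |v| < q then some |v| else some q) m ) := by
  induction xs generalizing t n m with
  | nil => simp
  | cons x xs ih =>
      simp only [List.foldl_cons, stepA, List.map_cons, List.sum_cons, List.filter_cons]
      rw [ih]
      by_cases hx : x < 0 <;>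
        simp only [hx, decide_true, decide_false, if_true, if_false, List.length_cons] <;>
        refine Prod.ext (by ring) (Prod.ext ?_ rfl) <;> push_cast <;> ring

-- A's strict-< running minimum equals foldl min, starting from a seen value
lemma foldMin_some (xs : List Int) (q : Int) :
    xs.foldl (fun o v => match o with
        | none => some |v|
        | some q => if |v| < q then some |v| else some q) (some q)
      = some ((xs.map (fun v => |v|)).foldl min q) := by
  induction xs generalizing q with
  | nil => simp
  | cons x xs ih =>
      simp only [List.foldl_cons, List.map_cons]
      rcases lt_or_ge |x| q with h | h
      · rw [if_pos h, ih, min_eq_right (le_of_lt h)]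
      · rw [if_neg (not_lt.mpr h), ih, min_eq_left h]

lemma foldlA_to_flatten (matrix : List (List Int)) (init : Int × Int × Option Int) :
    matrix.foldl (fun s row => row.foldl stepA s) init = matrix.flatten.foldl stepA init := by
  induction matrix generalizing init with
  | nil => simp
  | cons r rs ih => simp [List.foldl_append, ih]

lemma foldlB_to_flatten (matrix : List (List Int)) (init : Int × Option Int) :
    matrix.foldl (fun s row => row.foldl stepB s) init = matrix.flatten.foldl stepB init := by
  induction matrix generalizing init with
  | nil => simp
  | cons r rs ih => simp [List.foldl_append, ih]

-- the running minimum of absolute values is nonnegative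
lemma foldMin_nonneg (xs : List Int) (q : Int) (hq : 0 ≤ q) :
    0 ≤ (xs.map (fun v => |v|)).foldl min q := by
  induction xs generalizing q with
  | nil => simpa
  | cons x xs ih =>
      simp only [List.map_cons, List.foldl_cons]
      exact ih _ (le_min hq (abs_nonneg x))

-- B's parity DP characterised on a nonempty flat list:
-- even slot = total - (0 if #neg even else 2*min), odd slot = total - (0 if #neg odd else 2*min)
lemma foldB_char (x : Int) (xs : List Int) :
    (x :: xs).foldl stepB ((0 : Int), (none : Option Int)) =
      ( (|x| + (xs.map (fun v => |v|)).sum)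
          - (if ((x :: xs).filter (fun v => v < 0)).length % 2 = 0 then 0
             else 2 * (xs.map (fun v => |v|)).foldl min |x|)
      , some ((|x| + (xs.map (fun v => |v|)).sum)
          - (if ((x :: xs).filter (fun v => v < 0)).length % 2 = 1 then 0
             else 2 * (xs.map (fun v => |v|)).foldl min |x|)) ) := by
  induction xs using List.reverseRecOn with
  | nil =>
      simp only [List.foldl_cons, List.foldl_nil, stepB, List.map_nil, List.sum_nil,
        List.filter_cons, List.filter_nil]
      by_cases hx : x < 0
      · have hax : |x| = -x := abs_of_neg hx
        simp only [hx, decide_true, hax]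
        norm_num
        omega
      · have hax : |x| = x := abs_of_nonneg (not_lt.mp hx)
        simp only [hx, decide_false, hax]
        norm_num
        omega
  | append_singleton ys v ih =>
      have hcons : x :: (ys ++ [v]) = (x :: ys) ++ [v] := rfl
      rw [hcons, List.foldl_append, ih]
      set M := (ys.map (fun v => |v|)).foldl min |x| with hM
      set N := ((x :: ys).filter (fun v => v < 0)).length with hN
      have hm : 0 ≤ M := hM ▸ foldMin_nonneg _ _ (abs_nonneg x)
      have hLen : (((x :: ys) ++ [v]).filter (fun v => v < 0)).length
          = N + (if v < 0 then 1 else 0) := by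
        by_cases hv : v < 0 <;> by_cases hx : x < 0 <;>
          simp [hN, List.filter_append, hv, hx]
      have hSum : |x| + ((ys ++ [v]).map (fun v => |v|)).sum
          = (|x| + (ys.map (fun v => |v|)).sum) + |v| := by
        simp [add_assoc]
      have hMin : ((ys ++ [v]).map (fun v => |v|)).foldl min |x| = min M |v| := by
        simp [hM, List.foldl_append]
      rw [hLen, hSum, hMin]
      simp only [List.foldl_cons, List.foldl_nil, stepB, Prod.mk.injEq, Option.some.injEq]
      by_cases hv : v < 0
      · have hav : |v| = -v := abs_of_neg hv
        rw [if_pos hv, hav]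
        constructor <;> (simp only [max_def, min_def]; split_ifs <;> omega)
      · have hav : |v| = v := abs_of_nonneg (not_lt.mp hv)
        rw [if_neg hv, hav]
        constructor <;> (simp only [max_def, min_def]; split_ifs <;> omega)

-- a Nat-length counter and its Int cast have the same parity test
lemma cast_mod_two (L : Nat) : (((L : Int)) % 2 == 0) = (L % 2 == 0) := by
  rw [show ((2 : Int)) = ((2 : Nat) : Int) from rfl, ← Int.natCast_mod]
  rcases Nat.mod_two_eq_zero_or_one L with h | h <;> rw [h] <;> decide

-- ===== VERDICT =====
theorem maxMatrixSum_spec : Claim_equal_maxMatrixSum := by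
  intro matrix _
  unfold Spec_maxMatrixSum maxMatrixSum maxMatrixSum_alt
  rw [foldlA_to_flatten, foldlB_to_flatten, foldA_char]
  simp only [zero_add]
  rw [cast_mod_two]
  cases h : matrix.flatten with
  | nil => simp
  | cons x xs =>
      rw [foldB_char]
      simp only [List.foldl_cons]
      rw [foldMin_some]
      rcases Nat.mod_two_eq_zero_or_one (((x :: xs).filter (fun v => v < 0)).length) with hp | hp <;>
        simp [hp, List.map_cons, List.sum_cons]
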